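-- pv_equiv track=rewrite | github.com/Jalco28/Advent-of-Code | 2023/Day9.py | prev_value
-- ===== SOURCE A (Python) =====
-- def prev_value(differences: list[list]):
--     differences[-1].insert(0, 0)
--     i = -2
--     while True:
--         try:
--             differences[i].insert(0, -differences[i+1][0]+differences[i][0])
--         except IndexError:
--             break
--         i -= 1
--     return differences[0][0]
-- ===== SOURCE B (Python) =====
-- def prev_value(differences: list[list]):
--     # Alternating sum of each row's first element (last row excluded, as A
--     # overwrites its head with 0). One O(rows) pass, no list mutation.
--     total = 0
--     sign = 1
--     for row in differences[:-1]:
--         total += sign * row[0]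
--         sign = -sign
--     return total
-- ===== Notes on version B (the rewrite author's own statement) =====
-- stated objective: simpler
-- what changed: Instead of mutating the triangle bottom-up with insert(0,...) on every row and exception-driven negative indexing, B computes the result directly as the alternating sum of each row's first element in one forward pass without mutation.
-- outside the precondition, e.g. on prev_value([[5], [], [7]]): A returns 5, B raises IndexError
import Mathlib
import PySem

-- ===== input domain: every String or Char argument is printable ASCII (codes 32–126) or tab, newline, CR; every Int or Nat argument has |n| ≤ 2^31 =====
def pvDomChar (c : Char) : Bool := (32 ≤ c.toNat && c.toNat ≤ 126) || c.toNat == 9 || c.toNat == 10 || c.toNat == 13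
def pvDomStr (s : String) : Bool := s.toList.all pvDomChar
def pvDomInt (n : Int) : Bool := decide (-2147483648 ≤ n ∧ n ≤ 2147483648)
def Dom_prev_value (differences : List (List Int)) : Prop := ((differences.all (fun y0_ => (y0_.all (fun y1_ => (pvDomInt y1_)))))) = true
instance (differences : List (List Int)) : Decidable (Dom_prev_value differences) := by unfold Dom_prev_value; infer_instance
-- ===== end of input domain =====

-- B replaces A's bottom-up insert(0,...) mutation of every row with a single
-- forward pass computing the alternating sum of the rows' first elements.
-- NOTE: the Python A mutates its argument in place (prepends to each row); the
-- equivalence proved here is about the RETURN value only (B does not mutate).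

-- ===== PORT A =====
-- the `while True` loop: i = -2, -3, … corresponds to position p = n-2 down to 0;
-- `head? = none` (row out of range or empty) is Python's IndexError → break.
def prevValueLoopA : Nat → List (List Int) → List (List Int)
  | p, rows =>
    match (rows.getD (p+1) []).head?, (rows.getD p []).head? with
    | some b, some a =>
        let rows' := rows.modify p (fun row => (-b + a) :: row)
        match p with
        | 0 => rows'
        | Nat.succ p' => prevValueLoopA p' rows'
    | _, _ => rows

def prev_value (differences : List (List Int)) : Int :=
  let n := differences.length
  -- differences[-1].insert(0, 0)
  let rows0 := differences.modify (n - 1) (fun row => 0 :: row)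
  let rows1 := prevValueLoopA (n - 2) rows0
  -- return differences[0][0]  (Pre_ guarantees both heads exist)
  (rows1.headD []).headD 0

-- ===== PORT B =====
def prev_value_alt (differences : List (List Int)) : Int :=
  (differences.dropLast.foldl
    (fun (acc : Int × Int) row => (acc.1 + acc.2 * row.headD 0, -acc.2)) (0, 1)).1

-- ===== PRECONDITION & SPEC =====
-- Pre_ excludes the empty outer list (A raises IndexError on differences[-1]) and
-- inputs containing an empty row before the last (A breaks out of its loop early
-- and returns the untouched differences[0][0] — or raises if row 0 is empty —
-- while B's row[0] raises IndexError there).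
def Pre_prev_value (differences : List (List Int)) : Prop :=
  differences ≠ [] ∧ ∀ r ∈ differences.dropLast, r ≠ []
instance (differences : List (List Int)) : Decidable (Pre_prev_value differences) := by
  unfold Pre_prev_value; infer_instance

def pvWitness_prev_value : List (List Int) := [[1, 3], [2], [0]]

def Spec_prev_value (differences : List (List Int)) (out : Int) : Prop := out = prev_value_alt differences
instance (differences : List (List Int)) (out : Int) : Decidable (Spec_prev_value differences out) := by unfold Spec_prev_value; infer_instance

-- ===== CLAIM (what is proved, stated in full; the proofs are below) =====
def Claim_equal_prev_value : Prop := ∀ (differences : List (List Int)), Dom_prev_value differences → Pre_prev_value differences → Spec_prev_value differences (prev_value differences)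
-- ===== LEMMAS AND PROOFS =====

-- B's fold, generalized over the accumulator, equals a right fold of head-subtractions.
lemma pvFoldB (l : List (List Int)) (a s : Int) :
    (l.foldl (fun (acc : Int × Int) row => (acc.1 + acc.2 * row.headD 0, -acc.2)) (a, s)).1
      = a + s * l.foldr (fun r acc => r.headD 0 - acc) 0 := by
  induction l generalizing a s with
  | nil => simp
  | cons h t ih => simp only [List.foldl_cons, List.foldr_cons, ih]; ring

lemma pvTake_modify (l : List (List Int)) (k : Nat) (f : List Int → List Int) :
    (l.modify k f).take k = l.take k := by
  apply List.ext_getElem?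
  intro j
  by_cases hj : j < k
  · have hk : ¬ k = j := by omega
    rcases h : l[j]? with _ | a <;>
      simp [hj, hk, h]
  · simp [hj]

-- Invariant of A's loop: the final head of row 0 is the nested difference
-- foldr over rows 0..p, seeded with the (current) head of row p+1.
lemma pvLoopA_head (p : Nat) (rows : List (List Int))
    (hlen : p + 1 < rows.length)
    (hne : ∀ j ≤ p + 1, rows.getD j [] ≠ []) :
    ((prevValueLoopA p rows).headD []).headD 0
      = (rows.take (p+1)).foldr (fun r acc => r.headD 0 - acc)
          ((rows.getD (p+1) []).headD 0) := by
  induction p generalizing rows with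
  | zero =>
    have h0 := hne 0 (by omega)
    have h1 := hne 1 (by omega)
    match rows, hlen, h0, h1 with
    | r :: s :: u, _, h0, h1 =>
      cases r with
      | nil => simp [List.getD] at h0
      | cons x xs =>
        cases s with
        | nil => simp [List.getD] at h1
        | cons y ys =>
          simp [prevValueLoopA, List.modify, List.getD, List.take]
          ring
  | succ p' ih =>
    have hp1 := hne (p' + 1) (by omega)
    have hp2 := hne (p' + 2) (by omega)
    obtain ⟨x, xs, hx⟩ : ∃ x xs, rows.getD (p' + 1) [] = x :: xs := by
      cases h : rows.getD (p' + 1) [] with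
      | nil => exact absurd h hp1
      | cons x xs => exact ⟨x, xs, rfl⟩
    obtain ⟨y, ys, hy⟩ : ∃ y ys, rows.getD (p' + 2) [] = y :: ys := by
      cases h : rows.getD (p' + 2) [] with
      | nil => exact absurd h hp2
      | cons y ys => exact ⟨y, ys, rfl⟩
    have hlt1 : p' + 1 < rows.length := by omega
    have hel : rows[p' + 1]'hlt1 = x :: xs := by
      have := hx
      simpa [List.getD, List.getElem?_eq_getElem hlt1] using this
    have hget1 : rows[p' + 1]? = some (x :: xs) := by
      rw [List.getElem?_eq_getElem hlt1, hel]
    rw [prevValueLoopA, hx, hy]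
    simp only [List.head?_cons]
    set rows' := rows.modify (p' + 1) (fun row => (-y + x) :: row) with hrows'
    have hlen' : p' + 1 < rows'.length := by
      simp only [hrows', List.length_modify]; omega
    have hgetD' : ∀ j, j ≠ p' + 1 → rows'.getD j [] = rows.getD j [] := by
      intro j hj
      have hk : ¬ p' + 1 = j := by omega
      rcases h : rows[j]? with _ | r <;>
        simp [hrows', List.getD, hk, h]
    have hgetD'p : rows'.getD (p' + 1) [] = (-y + x) :: x :: xs := by
      simp [hrows', List.getD, hget1]
    have hne' : ∀ j ≤ p' + 1, rows'.getD j [] ≠ [] := by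
      intro j hj
      by_cases hj' : j = p' + 1
      · rw [hj', hgetD'p]; simp
      · rw [hgetD' j hj']; exact hne j (by omega)
    rw [ih rows' hlen' hne', hgetD'p, pvTake_modify]
    have hsucc : rows.take (p' + 1 + 1) = rows.take (p' + 1) ++ [x :: xs] := by
      rw [List.take_succ, hget1]; rfl
    rw [hsucc, List.foldr_append]
    simp only [List.foldr_cons, List.foldr_nil, List.headD_cons]
    congr 1
    omega

lemma pvDropLast_ne_nil (d : List (List Int)) (hpre : ∀ r ∈ d.dropLast, r ≠ [])
    (j : Nat) (hj : j + 1 < d.length) : d.getD j [] ≠ [] := by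
  have hjd : j < d.dropLast.length := by simp [List.length_dropLast]; omega
  have hmem : d.dropLast[j] ∈ d.dropLast := List.getElem_mem hjd
  have heq : d.dropLast[j] = d[j]'(by omega) := List.getElem_dropLast ..
  have : d.getD j [] = d[j]'(by omega) := by
    simp [List.getD, List.getElem?_eq_getElem (by omega : j < d.length)]
  rw [this, ← heq]
  exact hpre _ hmem

-- ===== VERDICT (by name: the statement is the Claim_ definition above) =====
theorem prev_value_spec : Claim_equal_prev_value := by
  intro d _ hpre
  obtain ⟨hnil, hrows⟩ := hpre
  unfold Spec_prev_value prev_value prev_value_alt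
  rw [pvFoldB]
  have hn : 1 ≤ d.length := by
    cases d with
    | nil => exact absurd rfl hnil
    | cons r t => simp
  set n := d.length with hnd
  set rows0 := d.modify (n - 1) (fun row => 0 :: row) with hrows0
  by_cases h1 : n = 1
  · -- single row: the loop breaks immediately, result 0; B's fold is empty.
    obtain ⟨r, hr⟩ : ∃ r, d = [r] := by
      cases d with
      | nil => exact absurd rfl hnil
      | cons r t =>
        cases t with
        | nil => exact ⟨r, rfl⟩
        | cons s u => simp [hnd] at h1
    subst hr
    simp [h1, prevValueLoopA, List.modify, List.getD]
  · have hn2 : 2 ≤ n := by omega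
    have hlen0 : n - 2 + 1 < rows0.length := by
      simp only [hrows0, List.length_modify]; omega
    have hgetD0 : ∀ j, j + 1 < n → rows0.getD j [] = d.getD j [] := by
      intro j hj
      have hk : ¬ n - 1 = j := by omega
      rcases h : d[j]? with _ | r <;>
        simp [hrows0, List.getD, hk, h]
    have hltn : n - 1 < d.length := by omega
    have hgetn : d[n - 1]? = some (d[n - 1]'hltn) := List.getElem?_eq_getElem hltn
    have hgetDlast : rows0.getD (n - 1) [] = 0 :: d[n - 1]'hltn := by
      simp [hrows0, List.getD, hgetn]
    have hne0 : ∀ j ≤ n - 2 + 1, rows0.getD j [] ≠ [] := by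
      intro j hj
      by_cases hjl : j = n - 1
      · rw [hjl, hgetDlast]; simp
      · rw [hgetD0 j (by omega)]
        exact pvDropLast_ne_nil d hrows j (by omega)
    have hmain := pvLoopA_head (n - 2) rows0 hlen0 hne0
    rw [hmain]
    have hlastz : (rows0.getD (n - 2 + 1) []).headD 0 = 0 := by
      rw [(by omega : n - 2 + 1 = n - 1), hgetDlast]; rfl
    rw [hlastz]
    have htake : rows0.take (n - 2 + 1) = d.dropLast := by
      rw [(by omega : n - 2 + 1 = n - 1)]
      rw [hrows0, pvTake_modify]
      rw [List.dropLast_eq_take]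
    rw [htake]
    ring
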